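-- pv_equiv track=rewrite | github.com/ddierschow/bamca | bin/useful.py | collapse_number_list
-- ===== SOURCE A (Python) =====
-- def collapse_number_list(lst):
--     intlist = []
--     strlist = []
--     maxlen = 0
--     for ent in lst:
--         try:
--             val = int(ent)
--         except Exception:
--             pass
--         else:
--             maxlen = max(maxlen, len(str(ent)))
--             intlist.append(val)
--             continue
--
--         try:
--             ents = ent.split('-', 1)
--             val1 = int(ents[0])
--             val2 = int(ents[1])
--         except Exception:
--             pass
--         else:
--             maxlen = max(maxlen, len(str(ent[0])))
--             maxlen = max(maxlen, len(str(ent[1])))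
--             intlist.extend(range(val1, val2 + 1))
--             continue
--
--         strlist.append(ent)
--
--     str1 = "%%0%dd" % maxlen
--     str2 = str1 + '-' + str1
--     intlist.sort()
--     start = None
--     prev = None
--     for val in intlist:
--         if start is None:
--             start = prev = val
--         elif val == prev + 1:
--             prev = val
--         elif start == prev:
--             strlist.append(str1 % start)
--             start = prev = val
--         else:
--             strlist.append(str2 % (start, prev))
--             start = prev = val
--     if start is not None:
--         if start == prev:
--             strlist.append(str1 % start)
--             start = None
--         else:
--             strlist.append(str2 % (start, prev))
--             start = None
--
--     return strlist
-- ===== SOURCE B (Python) =====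
-- def _int(s):
--     try:
--         return int(s)
--     except ValueError:
--         return None
--
--
-- def _interval(ent):
--     # the (lo, hi) interval a numeric token denotes, or None for a word token
--     v = _int(ent)
--     if v is not None:
--         return (v, v)
--     parts = ent.split('-', 1)
--     if len(parts) == 2:
--         lo, hi = _int(parts[0]), _int(parts[1])
--         if lo is not None and hi is not None:
--             return (lo, hi)
--     return None
--
--
-- def _fmt(lo, hi, width):
--     s = str(lo).zfill(width)
--     return s if lo == hi else s + '-' + str(hi).zfill(width)
--
--
-- def collapse_number_list(lst):
--     # Staged passes over the tokens, then an interval merge that never expands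
--     # a range token into its individual integers.
--     out = [e for e in lst if _interval(e) is None]
--     width = max((len(e) for e in lst if _int(e) is not None), default=0)
--     spans = sorted((iv for iv in (_interval(e) for e in lst)
--                     if iv is not None and iv[0] <= iv[1]),
--                    key=lambda iv: iv[0])
--     comps = []
--     for lo, hi in spans:
--         if comps and lo <= comps[-1][1] + 1:
--             comps[-1] = (comps[-1][0], max(comps[-1][1], hi))
--         else:
--             comps.append((lo, hi))
--     return out + [_fmt(lo, hi, width) for lo, hi in comps]
-- ===== Notes on version B (the rewrite author's own statement) =====
-- stated objective: alternative
-- what changed: B replaces A's single stateful parse loop and its expansion of every range token into individual integers by staged passes (word filter, width pass, interval list) followed by a merge of the sorted (lo,hi) intervals themselves into a component list that is formatted at the end.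
-- intended difference: On lists whose numeric tokens cover some integer more than once (a repeated number or overlapping ranges), A's scan of the sorted expanded values restarts a run at every duplicate and returns fragmented overlapping range strings, while B returns the properly merged ranges, which is the intended collapsed form. — e.g. on collapse_number_list(["1-3", "2-4"]): A returns ["1-2", "2-3", "3-4"], B returns ["1-4"]
import Mathlib
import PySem

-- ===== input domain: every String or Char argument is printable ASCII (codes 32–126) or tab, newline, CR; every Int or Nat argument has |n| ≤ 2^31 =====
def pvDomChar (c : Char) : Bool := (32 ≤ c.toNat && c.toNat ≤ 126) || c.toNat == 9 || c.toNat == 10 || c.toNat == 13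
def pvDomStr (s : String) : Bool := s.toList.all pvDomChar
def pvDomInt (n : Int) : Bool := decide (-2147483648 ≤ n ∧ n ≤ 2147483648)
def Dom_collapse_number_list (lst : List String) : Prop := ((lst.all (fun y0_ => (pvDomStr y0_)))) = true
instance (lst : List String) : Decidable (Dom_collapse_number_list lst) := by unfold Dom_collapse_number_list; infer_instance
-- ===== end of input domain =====

-- B re-implements the task in staged passes (word filter, width pass, interval list) and merges
-- the (lo,hi) intervals themselves into a component list, instead of A's single stateful pass
-- that expands every range token into its individual integers and scans the sorted expansion.

-- Shared formatting helper: Python's '%0Nd' % v is exactly str(v).zfill(N); both programs emit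
-- this very string ('"%%0%dd" % maxlen' in A, str(v).zfill(width) in B).
def pvPad (w : Int) (n : Int) : List Char := PySem.Chars.zfill (PySem.Int.toChars n) w

-- 'str1 % a' when a == b, else 'str2 % (a, b)' — the string both programs emit for a run [a..b].
def pvFmt (w : Int) (a b : Int) : String :=
  if a = b then String.ofList (pvPad w a) else String.ofList (pvPad w a ++ '-' :: pvPad w b)

-- ===== PORT A =====
-- one iteration of A's parsing loop; state = (intlist, strlist, maxlen).
-- 'len(str(ent))' is len(ent); in the range branch 'len(str(ent[0]))' and 'len(str(ent[1]))' are
-- lengths of single-character strings, i.e. 1 (ent has ≥ 2 chars there: ents[0] parsed as an int).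
def pvStepA (st : List Int × List String × Int) (ent : String) : List Int × List String × Int :=
  match PySem.Int.ofStr? ent with
  | some v => (st.1 ++ [v], st.2.1, max st.2.2 (PySem.Str.len ent))
  | none =>
    match PySem.Str.splitMax? ent "-" 1 with
    | some [s1, s2] =>
      match PySem.Int.ofStr? s1, PySem.Int.ofStr? s2 with
      | some v1, some v2 =>
        (st.1 ++ PySem.List.pyRange v1 (v2 + 1), st.2.1, max (max st.2.2 1) 1)
      | _, _ => (st.1, st.2.1 ++ [ent], st.2.2)
    | _ => (st.1, st.2.1 ++ [ent], st.2.2)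

-- one iteration of A's collapsing loop; start/prev are always set together, kept as one Option.
def pvScanA (w : Int) (st : Option (Int × Int) × List String) (val : Int) :
    Option (Int × Int) × List String :=
  match st with
  | (none, acc) => (some (val, val), acc)
  | (some (s, p), acc) =>
    if val = p + 1 then (some (s, val), acc)
    else (some (val, val), acc ++ [pvFmt w s p])   -- str1 % start if start == prev else str2 % (start, prev)

def collapse_number_list (lst : List String) : List String :=
  let st := lst.foldl pvStepA ([], [], 0)
  let intlist := PySem.List.sorted st.1 (fun x => x)    -- intlist.sort()
  let fin := intlist.foldl (pvScanA st.2.2) (none, st.2.1)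
  match fin.1 with
  | none => fin.2
  | some (s, p) => fin.2 ++ [pvFmt st.2.2 s p]          -- trailing 'if start is not None'

-- ===== PORT B =====
-- _interval(ent): the (lo, hi) interval a numeric token denotes, or none for a word token.
def pvInterval (ent : String) : Option (Int × Int) :=
  match PySem.Int.ofStr? ent with
  | some v => some (v, v)
  | none =>
    match PySem.Str.splitMax? ent "-" 1 with
    | some [s1, s2] =>
      match PySem.Int.ofStr? s1, PySem.Int.ofStr? s2 with
      | some lo, some hi => some (lo, hi)
      | _, _ => none
    | _ => none

-- the body of B's component loop; the Python list comps (appended at the end, comps[-1]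
-- inspected and replaced) is modelled reversed: the head is the current component.
def pvAdd (comps : List (Int × Int)) (iv : Int × Int) : List (Int × Int) :=
  match comps with
  | (clo, chi) :: done =>
    if iv.1 ≤ chi + 1 then (clo, max chi iv.2) :: done else iv :: (clo, chi) :: done
  | [] => [iv]

def collapse_number_list_alt (lst : List String) : List String :=
  let out := lst.filter (fun e => (pvInterval e).isNone)
  let width := ((lst.filter (fun e => (PySem.Int.ofStr? e).isSome)).map
    (fun e => PySem.Str.len e)).foldl max 0                     -- max(gen, default=0)
  let spans := PySem.List.sorted
    ((lst.filterMap pvInterval).filter (fun iv => decide (iv.1 ≤ iv.2))) (fun iv => iv.1)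
  let comps := spans.foldl pvAdd []
  out ++ comps.reverse.map (fun iv => pvFmt width iv.1 iv.2)    -- final reverse: see pvAdd's comment

-- ===== PRECONDITION & SPEC =====
-- the integers a single token stands for (a number token for itself, a range token for its span);
-- stated as one option-combinator expression over the inputs, independent of both ports:
def pvTokRange (ent : String) : List Int :=
  ((((PySem.Int.ofStr? ent).map fun v => [v]).or <|
    (fun l => if h2 : l.length = 2 then
        (PySem.Int.ofStr? l[0]).bind fun lo =>
          (PySem.Int.ofStr? l[1]).map fun hi => PySem.List.pyRange lo (hi + 1)
      else none) ((PySem.Str.splitMax? ent "-" 1).getD [])).getD [])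

-- all integers the numeric tokens of the input cover, with multiplicity
def pvCovered (lst : List String) : List Int := lst.flatMap pvTokRange

-- On lists whose numeric tokens cover some integer more than once (a repeated number or
-- overlapping ranges), A's scan of the sorted expanded values restarts a run at every duplicate
-- and returns fragmented overlapping range strings, while B returns the properly merged ranges,
-- which is the intended collapsed form.
def D_collapse_number_list (lst : List String) : Prop :=
  ¬ (pvCovered lst).Nodup
instance (lst : List String) : Decidable (D_collapse_number_list lst) := by
  unfold D_collapse_number_list; infer_instance

def Spec_collapse_number_list (lst : List String) (out : List String) : Prop :=
  ¬ D_collapse_number_list lst → out = collapse_number_list_alt lst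
instance (lst : List String) (out : List String) : Decidable (Spec_collapse_number_list lst out) := by
  unfold Spec_collapse_number_list; infer_instance

def pvDiffWitness_collapse_number_list : List String := ["1-3", "2-4"]
def pvDiffWitnessOut_collapse_number_list : (List String) × (List String) :=
  (["1-2", "2-3", "3-4"], ["1-4"])

-- ===== CLAIM (what is proved, stated in full; the proofs are below) =====
def Claim_unchanged_collapse_number_list : Prop := ∀ (lst : List String), Dom_collapse_number_list lst → Spec_collapse_number_list lst (collapse_number_list lst)
def Claim_exact_collapse_number_list : Prop := ∀ (lst : List String), Dom_collapse_number_list lst → D_collapse_number_list lst → collapse_number_list lst ≠ collapse_number_list_alt lst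
def Claim_changed_collapse_number_list : Prop := Dom_collapse_number_list (pvDiffWitness_collapse_number_list) ∧ D_collapse_number_list (pvDiffWitness_collapse_number_list) ∧ collapse_number_list (pvDiffWitness_collapse_number_list) = pvDiffWitnessOut_collapse_number_list.1 ∧ collapse_number_list_alt (pvDiffWitness_collapse_number_list) = pvDiffWitnessOut_collapse_number_list.2 ∧ pvDiffWitnessOut_collapse_number_list.1 ≠ pvDiffWitnessOut_collapse_number_list.2

-- ===== LEMMAS AND PROOFS =====

theorem pvRange_nil {a b : Int} (h : b ≤ a) : PySem.List.pyRange a b = [] := by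
  simp [PySem.List.pyRange]; omega

-- the set of integers an interval spans (proof-side view of a validated (lo, hi) pair)
def pvCover (p : Int × Int) : List Int := PySem.List.pyRange p.1 (p.2 + 1)

theorem pvCover_single (v : Int) : pvCover (v, v) = [v] := by
  simp only [pvCover]
  rw [PySem.List.pyRange_one_cons (by omega), pvRange_nil (by omega)]

-- a token's integers, re-grouped through B's token parser
theorem pvTok_cover (ent : String) : pvTokRange ent = (pvInterval ent).elim [] pvCover := by
  unfold pvTokRange pvInterval
  cases hv : PySem.Int.ofStr? ent with
  | some v => simp [pvCover_single]
  | none =>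
    cases hsp : PySem.Str.splitMax? ent "-" 1 with
    | none => simp
    | some parts =>
      match parts with
      | [] => simp
      | [s1] => simp
      | s1 :: s2 :: s3 :: rest => simp
      | [s1, s2] =>
        cases hv1 : PySem.Int.ofStr? s1 <;> cases hv2 : PySem.Int.ofStr? s2 <;>
          simp [hv1, hv2, pvCover]

-- the width-component of one A step, as a standalone function
def pvWStepA (m : Int) (ent : String) : Int :=
  match PySem.Int.ofStr? ent with
  | some _ => max m (PySem.Str.len ent)
  | none =>
    match PySem.Str.splitMax? ent "-" 1 with
    | some [s1, s2] =>
      match PySem.Int.ofStr? s1, PySem.Int.ofStr? s2 with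
      | some _, some _ => max (max m 1) 1
      | _, _ => m
    | _ => m

-- the width-component of one B width-pass step
def pvWStepB (m : Int) (ent : String) : Int :=
  if (PySem.Int.ofStr? ent).isSome then max m (PySem.Str.len ent) else m

theorem pvStepA_fst (ent : String) (a : List Int × List String × Int) :
    (pvStepA a ent).1 = a.1 ++ pvTokRange ent := by
  unfold pvStepA pvTokRange
  cases hv : PySem.Int.ofStr? ent with
  | some v => simp
  | none =>
    cases hsp : PySem.Str.splitMax? ent "-" 1 with
    | none => simp
    | some parts =>
      match parts with
      | [] => simp
      | [s1] => simp
      | s1 :: s2 :: s3 :: rest => simp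
      | [s1, s2] =>
        cases hv1 : PySem.Int.ofStr? s1 <;> cases hv2 : PySem.Int.ofStr? s2 <;>
          simp [hv1, hv2]

theorem pvStepA_str (ent : String) (a : List Int × List String × Int) :
    (pvStepA a ent).2.1 = a.2.1 ++ (if (pvInterval ent).isNone then [ent] else []) := by
  unfold pvStepA pvInterval
  cases hv : PySem.Int.ofStr? ent with
  | some v => simp
  | none =>
    cases hsp : PySem.Str.splitMax? ent "-" 1 with
    | none => simp
    | some parts =>
      match parts with
      | [] => simp
      | [s1] => simp
      | s1 :: s2 :: s3 :: rest => simp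
      | [s1, s2] =>
        cases hv1 : PySem.Int.ofStr? s1 <;> cases hv2 : PySem.Int.ofStr? s2 <;> simp [hv1, hv2]

theorem pvStepA_w (ent : String) (a : List Int × List String × Int) :
    (pvStepA a ent).2.2 = pvWStepA a.2.2 ent := by
  unfold pvStepA pvWStepA
  cases hv : PySem.Int.ofStr? ent with
  | some v => simp
  | none =>
    cases hsp : PySem.Str.splitMax? ent "-" 1 with
    | none => simp
    | some parts =>
      match parts with
      | [] => simp
      | [s1] => simp
      | s1 :: s2 :: s3 :: rest => simp
      | [s1, s2] =>
        cases hv1 : PySem.Int.ofStr? s1 <;> cases hv2 : PySem.Int.ofStr? s2 <;> simp [hv1, hv2]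

theorem pvParse_tok : ∀ (lst : List String) (a : List Int × List String × Int),
    (lst.foldl pvStepA a).1 = a.1 ++ pvCovered lst := by
  intro lst
  induction lst with
  | nil => intro a; simp [pvCovered]
  | cons ent rest ih =>
    intro a
    simp only [List.foldl_cons, pvCovered, List.flatMap_cons]
    rw [ih, pvStepA_fst, List.append_assoc]
    rfl

theorem pvParse_str : ∀ (lst : List String) (a : List Int × List String × Int),
    (lst.foldl pvStepA a).2.1 = a.2.1 ++ lst.filter (fun e => (pvInterval e).isNone) := by
  intro lst
  induction lst with
  | nil => intro a; simp
  | cons ent rest ih =>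
    intro a
    simp only [List.foldl_cons, List.filter_cons]
    rw [ih, pvStepA_str]
    cases h : (pvInterval ent).isNone <;> simp only [Bool.false_eq_true, if_false, if_true] <;> simp

theorem pvParse_w : ∀ (lst : List String) (a : List Int × List String × Int),
    (lst.foldl pvStepA a).2.2 = lst.foldl pvWStepA a.2.2 := by
  intro lst
  induction lst with
  | nil => intro a; rfl
  | cons ent rest ih =>
    intro a
    simp only [List.foldl_cons]
    rw [ih, pvStepA_w]

-- B's width pass, rewritten as a plain fold over the tokens
theorem pvWidthB_fold : ∀ (lst : List String) (m : Int),
    ((lst.filter (fun e => (PySem.Int.ofStr? e).isSome)).map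
      (fun e => PySem.Str.len e)).foldl max m = lst.foldl pvWStepB m := by
  intro lst
  induction lst with
  | nil => intro m; rfl
  | cons ent rest ih =>
    intro m
    rw [List.filter_cons]
    cases h : (PySem.Int.ofStr? ent).isSome
    · rw [if_neg (by simp), List.foldl_cons]
      rw [show pvWStepB m ent = m by simp [pvWStepB, h]]
      exact ih m
    · rw [if_pos rfl, List.map_cons, List.foldl_cons, List.foldl_cons]
      rw [show pvWStepB m ent = max m (PySem.Str.len ent) by simp [pvWStepB, h]]
      exact ih _

-- width bookkeeping: A's maxlen m and B's width m' differ only in that range tokens bump A's to ≥ 1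
def pvWidthRel (m m' : Int) : Prop := m' ≤ m ∧ m ≤ max m' 1

theorem pvWStep_rel (ent : String) {m m' : Int} (h : pvWidthRel m m') :
    pvWidthRel (pvWStepA m ent) (pvWStepB m' ent) := by
  obtain ⟨h1, h2⟩ := h
  unfold pvWStepA pvWStepB
  cases hv : PySem.Int.ofStr? ent with
  | some v => refine ⟨?_, ?_⟩ <;> (try simp) <;> omega
  | none =>
    cases hsp : PySem.Str.splitMax? ent "-" 1 with
    | none => refine ⟨?_, ?_⟩ <;> (try simp) <;> omega
    | some parts =>
      match parts with
      | [] => refine ⟨?_, ?_⟩ <;> (try simp) <;> omega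
      | [s1] => refine ⟨?_, ?_⟩ <;> (try simp) <;> omega
      | s1 :: s2 :: s3 :: rest => refine ⟨?_, ?_⟩ <;> (try simp) <;> omega
      | [s1, s2] =>
        cases hv1 : PySem.Int.ofStr? s1 <;> cases hv2 : PySem.Int.ofStr? s2 <;>
          refine ⟨?_, ?_⟩ <;> simp only [hv1, hv2] <;> (try simp) <;> omega

theorem pvW_rel : ∀ (lst : List String) (m m' : Int), pvWidthRel m m' →
    pvWidthRel (lst.foldl pvWStepA m) (lst.foldl pvWStepB m') := by
  intro lst
  induction lst with
  | nil => intro m m' h; exact h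
  | cons ent rest ih =>
    intro m m' h
    exact ih _ _ (pvWStep_rel ent h)

-- the covered integers, re-grouped as the covers of B's validated interval list
theorem pvCov_spans : ∀ (lst : List String),
    pvCovered lst =
      ((lst.filterMap pvInterval).filter (fun iv => decide (iv.1 ≤ iv.2))).flatMap pvCover := by
  intro lst
  induction lst with
  | nil => rfl
  | cons e r ih =>
    have iht : List.flatMap pvTokRange r
        = ((r.filterMap pvInterval).filter (fun iv => decide (iv.1 ≤ iv.2))).flatMap pvCover := ih
    show pvTokRange e ++ List.flatMap pvTokRange r
        = (((e :: r).filterMap pvInterval).filter (fun iv => decide (iv.1 ≤ iv.2))).flatMap pvCover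
    rw [List.filterMap_cons, pvTok_cover]
    cases h : pvInterval e with
    | none => simpa using iht
    | some iv =>
      obtain ⟨lo, hi⟩ := iv
      by_cases hle : lo ≤ hi
      · rw [List.filter_cons_of_pos (by simpa using hle), List.flatMap_cons, iht]
        rfl
      · have hnil : pvCover (lo, hi) = [] := by
          simp only [pvCover]; exact pvRange_nil (by omega)
        rw [List.filter_cons_of_neg (by simpa using hle), iht]
        simp [hnil]

-- proof-only helper: B's merge written as a forward fold in A's shape (open interval + emitted
-- strings), the stepping stone between A's value scan and B's component list
def pvMergeB (w : Int) (st : Option (Int × Int) × List String) (iv : Int × Int) :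
    Option (Int × Int) × List String :=
  match st with
  | (none, acc) => (some iv, acc)
  | (some (a, b), acc) =>
    if iv.1 ≤ b + 1 then (some (a, max b iv.2), acc)
    else (some iv, acc ++ [pvFmt w a b])

-- consuming the strictly consecutive tail of a block keeps the run open
theorem pvScan_block (w : Int) : ∀ (k : Nat) (s p b : Int) acc, p ≤ b → (b - p).toNat = k →
    (PySem.List.pyRange (p + 1) (b + 1)).foldl (pvScanA w) (some (s, p), acc) = (some (s, b), acc) := by
  intro k
  induction k with
  | zero =>
    intro s p b acc hpb hk
    have : b = p := by omega
    subst this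
    rw [pvRange_nil (by omega)]
    rfl
  | succ k ih =>
    intro s p b acc hpb hk
    rw [PySem.List.pyRange_one_cons (by omega : p + 1 < b + 1)]
    rw [List.foldl_cons]
    have hstep : pvScanA w (some (s, p), acc) (p + 1) = (some (s, p + 1), acc) := by
      simp [pvScanA]
    rw [hstep]
    exact ih s (p + 1) b acc (by omega) (by omega)

-- A's value scan and the forward interval fold agree from aligned open states
theorem pvScan_merge (w : Int) : ∀ (J : List (Int × Int)) (s p : Int) (acc : List String),
    (∀ iv ∈ J, iv.1 ≤ iv.2) → J.Pairwise (fun x y => x.2 < y.1) → (∀ iv ∈ J, p < iv.1) →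
    (match (J.flatMap pvCover).foldl (pvScanA w) (some (s, p), acc) with
      | (none, acc') => acc'
      | (some (a, b), acc') => acc' ++ [pvFmt w a b]) =
    (match J.foldl (pvMergeB w) (some (s, p), acc) with
      | (none, acc') => acc'
      | (some (a, b), acc') => acc' ++ [pvFmt w a b]) := by
  intro J
  induction J with
  | nil => intro s p acc _ _ _; rfl
  | cons hd rest ih =>
    obtain ⟨a, b⟩ := hd
    intro s p acc h1 h2 h3
    have hab : a ≤ b := h1 (a, b) (by simp)
    have hpa : p < a := h3 (a, b) (by simp)
    rw [List.pairwise_cons] at h2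
    have hcov : pvCover (a, b) = a :: PySem.List.pyRange (a + 1) (b + 1) := by
      simp only [pvCover]
      exact PySem.List.pyRange_one_cons (by omega)
    rw [List.flatMap_cons, List.foldl_append, hcov, List.foldl_cons]
    by_cases hadj : a = p + 1
    · have hstepA : pvScanA w (some (s, p), acc) a = (some (s, a), acc) := by
        simp [pvScanA, hadj]
      rw [hstepA, pvScan_block w (b - a).toNat s a b acc hab rfl]
      rw [List.foldl_cons]
      have hstepB' : pvMergeB w (some (s, p), acc) (a, b) = (some (s, b), acc) := by
        simp only [pvMergeB]
        rw [if_pos (by omega)]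
        have : max p b = b := by omega
        rw [this]
      rw [hstepB']
      exact ih s b acc (fun iv hiv => h1 iv (by simp [hiv])) h2.2 h2.1
    · have hstepA : pvScanA w (some (s, p), acc) a = (some (a, a), acc ++ [pvFmt w s p]) := by
        simp only [pvScanA]
        rw [if_neg (by omega)]
      rw [hstepA, pvScan_block w (b - a).toNat a a b (acc ++ [pvFmt w s p]) hab rfl]
      rw [List.foldl_cons]
      have hstepB' : pvMergeB w (some (s, p), acc) (a, b) = (some (a, b), acc ++ [pvFmt w s p]) := by
        simp only [pvMergeB]
        rw [if_neg (by omega)]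
      rw [hstepB']
      exact ih a b (acc ++ [pvFmt w s p]) (fun iv hiv => h1 iv (by simp [hiv])) h2.2 h2.1

theorem pvScan_merge0 (w : Int) (J : List (Int × Int)) (acc : List String)
    (h1 : ∀ iv ∈ J, iv.1 ≤ iv.2) (h2 : J.Pairwise (fun x y => x.2 < y.1)) :
    (match (J.flatMap pvCover).foldl (pvScanA w) (none, acc) with
      | (none, acc') => acc'
      | (some (a, b), acc') => acc' ++ [pvFmt w a b]) =
    (match J.foldl (pvMergeB w) (none, acc) with
      | (none, acc') => acc'
      | (some (a, b), acc') => acc' ++ [pvFmt w a b]) := by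
  match J with
  | [] => rfl
  | (a, b) :: rest =>
    have hab : a ≤ b := h1 (a, b) (by simp)
    rw [List.pairwise_cons] at h2
    have hcov : pvCover (a, b) = a :: PySem.List.pyRange (a + 1) (b + 1) := by
      simp only [pvCover]
      exact PySem.List.pyRange_one_cons (by omega)
    rw [List.flatMap_cons, List.foldl_append, hcov, List.foldl_cons]
    have hstepA : pvScanA w (none, acc) a = (some (a, a), acc) := by simp [pvScanA]
    rw [hstepA, pvScan_block w (b - a).toNat a a b acc hab rfl, List.foldl_cons]
    have hstepB : pvMergeB w (none, acc) (a, b) = (some (a, b), acc) := by simp [pvMergeB]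
    rw [hstepB]
    exact pvScan_merge w rest a b acc (fun iv hiv => h1 iv (by simp [hiv])) h2.2 h2.1

-- the forward fold's final output equals B's component-list output
theorem pvAdd_scan (w : Int) : ∀ (J : List (Int × Int)) (cur : Int × Int)
    (comps : List (Int × Int)) (acc : List String),
    (match J.foldl (pvMergeB w) (some cur, acc ++ comps.reverse.map (fun iv => pvFmt w iv.1 iv.2)) with
      | (none, a) => a
      | (some (x, y), a) => a ++ [pvFmt w x y]) =
    acc ++ ((J.foldl pvAdd (cur :: comps)).reverse.map (fun iv => pvFmt w iv.1 iv.2)) := by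
  intro J
  induction J with
  | nil =>
    intro cur comps acc
    obtain ⟨a, b⟩ := cur
    simp [List.reverse_cons, List.map_append, List.append_assoc]
  | cons iv rest ih =>
    intro cur comps acc
    obtain ⟨a, b⟩ := cur
    rw [List.foldl_cons, List.foldl_cons]
    by_cases h : iv.1 ≤ b + 1
    · have hB : pvMergeB w (some (a, b), acc ++ comps.reverse.map (fun iv => pvFmt w iv.1 iv.2)) iv
          = (some (a, max b iv.2), acc ++ comps.reverse.map (fun iv => pvFmt w iv.1 iv.2)) := by
        simp only [pvMergeB]; rw [if_pos h]
      have hC : pvAdd ((a, b) :: comps) iv = (a, max b iv.2) :: comps := by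
        simp only [pvAdd]; rw [if_pos h]
      rw [hB, hC]
      exact ih (a, max b iv.2) comps acc
    · have hB : pvMergeB w (some (a, b), acc ++ comps.reverse.map (fun iv => pvFmt w iv.1 iv.2)) iv
          = (some iv, (acc ++ comps.reverse.map (fun iv => pvFmt w iv.1 iv.2)) ++ [pvFmt w a b]) := by
        simp only [pvMergeB]; rw [if_neg h]
      have hC : pvAdd ((a, b) :: comps) iv = iv :: (a, b) :: comps := by
        simp only [pvAdd]; rw [if_neg h]
      rw [hB, hC]
      have : (acc ++ comps.reverse.map (fun iv => pvFmt w iv.1 iv.2)) ++ [pvFmt w a b]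
          = acc ++ ((a, b) :: comps).reverse.map (fun iv => pvFmt w iv.1 iv.2) := by
        simp [List.reverse_cons, List.map_append, List.append_assoc]
      rw [this]
      exact ih iv ((a, b) :: comps) acc

theorem pvToDigitsCore_ne_nil : ∀ (b fuel n : Nat) (ds : List Char), ds ≠ [] →
    Nat.toDigitsCore b fuel n ds ≠ [] := by
  intro b fuel
  induction fuel with
  | zero => intro n ds h; simpa [Nat.toDigitsCore] using h
  | succ f ih =>
    intro n ds h
    rw [Nat.toDigitsCore]
    split
    · simp
    · exact ih _ _ (by simp)

theorem pvToChars_ne_nil (n : Int) : PySem.Int.toChars n ≠ [] := by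
  unfold PySem.Int.toChars
  split
  · simp
  · rw [Nat.toDigits, Nat.toDigitsCore]
    split
    · simp
    · exact pvToDigitsCore_ne_nil _ _ _ _ (by simp)

theorem pvPad_le_one {m : Int} (h : m ≤ 1) (n : Int) : pvPad m n = PySem.Int.toChars n := by
  have h1 : 1 ≤ (PySem.Int.toChars n).length :=
    List.length_pos_of_ne_nil (pvToChars_ne_nil n)
  unfold pvPad PySem.Chars.zfill
  rw [if_pos (by exact_mod_cast le_trans h (by exact_mod_cast h1))]

theorem pvFmt_width {m m' : Int} (h : pvWidthRel m m') : pvFmt m = pvFmt m' := by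
  obtain ⟨hw1, hw2⟩ := h
  by_cases h2 : 2 ≤ m'
  · have : m = m' := by omega
    rw [this]
  · funext a b
    simp only [pvFmt, pvPad_le_one (show m ≤ 1 by omega), pvPad_le_one (show m' ≤ 1 by omega)]

theorem pvScanA_congr {w w' : Int} (h : pvFmt w = pvFmt w') : pvScanA w = pvScanA w' := by
  funext st val
  simp only [pvScanA, h]

-- ===== tightness: inside D_ the outputs always differ (A's is strictly longer) =====

-- number of strings A's collapsing loop emits after seeing val-list xs from open run (s, p)
def pvBreaks : List Int → Int → Nat
  | [], _ => 0
  | y :: ys, p => (if y = p + 1 then 0 else 1) + pvBreaks ys y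

def pvEA : List Int → Nat
  | [] => 0
  | x :: xs => 1 + pvBreaks xs x

-- number of further components the merge produces after an open component ending at b
def pvMBr : List (Int × Int) → Int → Nat
  | [], _ => 0
  | iv :: r, b => if iv.1 ≤ b + 1 then pvMBr r (if b ≤ iv.2 then iv.2 else b) else 1 + pvMBr r iv.2

def pvEB : List (Int × Int) → Nat
  | [] => 0
  | iv :: r => 1 + pvMBr r iv.2

-- length of A's final output given the scan's end state
def pvLenFin (r : Option (Int × Int) × List String) : Nat :=
  match r.1 with
  | none => r.2.length
  | some _ => r.2.length + 1

-- the component ends of a set of integers: members whose successor is absent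
def pvEnds (S : Finset ℤ) : Finset ℤ := S.filter (fun v => v + 1 ∉ S)

def pvUnionF (J : List (Int × Int)) : Finset ℤ := (J.flatMap pvCover).toFinset

theorem pvUnionF_cons (iv : Int × Int) (r : List (Int × Int)) :
    pvUnionF (iv :: r) = Finset.Icc iv.1 iv.2 ∪ pvUnionF r := by
  unfold pvUnionF
  rw [List.flatMap_cons, List.toFinset_append]
  congr 1
  ext v
  simp [pvCover, PySem.List.mem_pyRange_one, Finset.mem_Icc]

theorem pvLenA : ∀ (xs : List Int) (w s p : Int) (acc : List String),
    pvLenFin (xs.foldl (pvScanA w) (some (s, p), acc)) = acc.length + 1 + pvBreaks xs p := by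
  intro xs
  induction xs with
  | nil => intro w s p acc; rfl
  | cons y ys ih =>
    intro w s p acc
    rw [List.foldl_cons]
    by_cases h : y = p + 1
    · have : pvScanA w (some (s, p), acc) y = (some (s, y), acc) := by simp [pvScanA, h]
      rw [this, ih]
      simp [pvBreaks, h]
    · have : pvScanA w (some (s, p), acc) y = (some (y, y), acc ++ [pvFmt w s p]) := by
        simp only [pvScanA]; rw [if_neg h]
      rw [this, ih]
      simp only [pvBreaks, if_neg h, List.length_append, List.length_cons, List.length_nil]
      omega

theorem pvLenA0 : ∀ (xs : List Int) (w : Int) (acc : List String),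
    pvLenFin (xs.foldl (pvScanA w) (none, acc)) = acc.length + pvEA xs := by
  intro xs w acc
  cases xs with
  | nil => rfl
  | cons x rest =>
    rw [List.foldl_cons]
    have : pvScanA w (none, acc) x = (some (x, x), acc) := by simp [pvScanA]
    rw [this, pvLenA]
    simp only [pvEA]
    omega

-- size of B's component list, from an open head component
theorem pvAdd_len : ∀ (J : List (Int × Int)) (cur : Int × Int) (comps : List (Int × Int)),
    (J.foldl pvAdd (cur :: comps)).length = comps.length + 1 + pvMBr J cur.2 := by
  intro J
  induction J with
  | nil => intro cur comps; simp [pvMBr]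
  | cons iv r ih =>
    intro cur comps
    obtain ⟨a, b⟩ := cur
    rw [List.foldl_cons]
    by_cases h : iv.1 ≤ b + 1
    · have : pvAdd ((a, b) :: comps) iv = (a, max b iv.2) :: comps := by
        simp only [pvAdd]; rw [if_pos h]
      rw [this, ih]
      simp only [pvMBr, if_pos h]
      rw [max_def]
    · have : pvAdd ((a, b) :: comps) iv = iv :: (a, b) :: comps := by
        simp only [pvAdd]; rw [if_neg h]
      rw [this, ih]
      simp only [pvMBr, if_neg h, List.length_cons]
      omega

-- absorbing a full segment [c..d] whose left part is below everything of R does not change the ends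
theorem pvSeg (c d : Int) (R : Finset ℤ) (hcd : c ≤ d) (hR : ∀ v ∈ R, c ≤ v) :
    pvEnds (Finset.Icc c d ∪ R) = pvEnds (insert d (R.filter (fun v => d < v))) := by
  ext v
  have a1 := hR v
  have a2 := hR (v + 1)
  simp only [pvEnds, Finset.mem_filter, Finset.mem_union, Finset.mem_Icc, Finset.mem_insert]
  by_cases h1 : v ∈ R <;> by_cases h2 : v + 1 ∈ R <;>
    (try have b1 := a1 h1) <;> (try have b2 := a2 h2) <;>
    simp only [h1, h2] <;> (first | omega | (simp; omega))

-- an isolated point strictly below everything of T is one extra end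
theorem pvIso (b : Int) (T : Finset ℤ) (hT : ∀ v ∈ T, b + 1 < v) :
    pvEnds (insert b T) = insert b (pvEnds T) := by
  ext v
  have a1 := hT v
  have a2 := hT (v + 1)
  simp only [pvEnds, Finset.mem_filter, Finset.mem_insert]
  by_cases h1 : v ∈ T <;> by_cases h2 : v + 1 ∈ T <;>
    (try have b1 := a1 h1) <;> (try have b2 := a2 h2) <;>
    simp only [h1, h2] <;> (first | omega | (simp; omega))

-- inserting a point whose successor is present, below everything of S, adds no end
theorem pvNoEnd (p : Int) (S : Finset ℤ) (hp : p + 1 ∈ S) (hS : ∀ v ∈ S, p < v) :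
    pvEnds (insert p S) = pvEnds S := by
  ext v
  have a1 := hS v
  have a2 := hS (v + 1)
  simp only [pvEnds, Finset.mem_filter, Finset.mem_insert]
  by_cases h1 : v ∈ S <;> by_cases h2 : v + 1 ∈ S <;>
    (try have b1 := a1 h1) <;> (try have b2 := a2 h2) <;>
    simp only [h1, h2] <;>
    (first | omega | (simp; omega) | (simp; rintro rfl; exact absurd hp h2) | simp)

theorem mem_pvUnionF {J : List (Int × Int)} {v : Int} :
    v ∈ pvUnionF J ↔ ∃ iv ∈ J, iv.1 ≤ v ∧ v ≤ iv.2 := by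
  unfold pvUnionF
  simp [pvCover, PySem.List.mem_pyRange_one]

theorem pvUnionF_lb {J : List (Int × Int)} {c v : Int} (h : ∀ iv ∈ J, c ≤ iv.1)
    (hm : v ∈ pvUnionF J) : c ≤ v := by
  rw [mem_pvUnionF] at hm
  obtain ⟨iv, hiv, h1, _⟩ := hm
  exact le_trans (h iv hiv) h1

-- B's remaining component count = number of component ends beyond the open component
theorem pvCountB : ∀ (J : List (Int × Int)) (b : Int), (∀ iv ∈ J, iv.1 ≤ iv.2) →
    J.Pairwise (fun x y => x.1 ≤ y.1) →
    1 + pvMBr J b = (pvEnds (insert b ((pvUnionF J).filter (fun v => b < v)))).card := by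
  intro J
  induction J with
  | nil =>
    intro b _ _
    have h0 : pvUnionF ([] : List (Int × Int)) = ∅ := rfl
    have hone : pvEnds {b} = {b} := by
      ext v; simp [pvEnds]; omega
    simp [pvMBr, h0, hone]
  | cons iv r ih =>
    obtain ⟨lo, hi⟩ := iv
    intro b hle hp
    rw [List.pairwise_cons] at hp
    have hlh : lo ≤ hi := hle (lo, hi) (by simp)
    have hrle : ∀ iv ∈ r, iv.1 ≤ iv.2 := fun iv h => hle iv (by simp [h])
    have hrlo : ∀ v ∈ pvUnionF r, lo ≤ v := fun v hv =>
      pvUnionF_lb (fun iv h => hp.1 iv h) hv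
    have hb1 : b ≤ max b hi := le_max_left b hi
    have hb2 : hi ≤ max b hi := le_max_right b hi
    have hb3 : max b hi = b ∨ max b hi = hi := max_choice b hi
    by_cases h : lo ≤ b + 1
    · have hmb : pvMBr ((lo, hi) :: r) b = pvMBr r (max b hi) := by
        simp only [pvMBr, if_pos h]
        rw [max_def]
      rw [hmb, ih (max b hi) hrle hp.2]
      congr 1
      have hset : insert b ((pvUnionF ((lo, hi) :: r)).filter (fun v => b < v)) =
          Finset.Icc b (max b hi) ∪ (pvUnionF r).filter (fun v => b < v) := by
        ext v
        simp only [pvUnionF_cons, Finset.mem_insert, Finset.mem_filter, Finset.mem_union,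
          Finset.mem_Icc]
        by_cases h1 : v ∈ pvUnionF r <;> (try have := hrlo v h1) <;> simp only [h1] <;>
          (first | omega | (simp; omega))
      have hff : ((pvUnionF r).filter (fun v => b < v)).filter (fun v => max b hi < v)
          = (pvUnionF r).filter (fun v => max b hi < v) := by
        rw [Finset.filter_filter]
        apply Finset.filter_congr
        intro v hv
        constructor
        · intro hyp; omega
        · intro hyp; exact ⟨by omega, hyp⟩
      rw [hset, pvSeg b (max b hi) _ (by omega) (fun v hv => (Finset.mem_filter.1 hv).2.le), hff]
    · have hmb : pvMBr ((lo, hi) :: r) b = 1 + pvMBr r hi := by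
        simp only [pvMBr]; rw [if_neg h]
      have hTlb : ∀ v ∈ Finset.Icc lo hi ∪ pvUnionF r, b + 1 < v := by
        intro v hv
        rcases Finset.mem_union.1 hv with hv | hv
        · have := Finset.mem_Icc.1 hv; omega
        · have := hrlo v hv; omega
      have hset : insert b ((pvUnionF ((lo, hi) :: r)).filter (fun v => b < v)) =
          insert b (Finset.Icc lo hi ∪ pvUnionF r) := by
        ext v
        simp only [pvUnionF_cons, Finset.mem_insert, Finset.mem_filter, Finset.mem_union,
          Finset.mem_Icc]
        by_cases h1 : v ∈ pvUnionF r <;> (try have := hrlo v h1) <;> simp only [h1] <;>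
          (first | omega | (simp; omega))
      have hbn : b ∉ pvEnds (insert hi ((pvUnionF r).filter (fun v => hi < v))) := by
        intro hmem
        have h' := (Finset.mem_filter.1 hmem).1
        rcases Finset.mem_insert.1 h' with h'' | h''
        · omega
        · have := (Finset.mem_filter.1 h'').2
          omega
      rw [hmb, ih hi hrle hp.2, hset, pvIso b _ hTlb,
        pvSeg lo hi _ hlh hrlo, Finset.card_insert_of_notMem hbn]
      omega

-- A's emission count on a sorted value list = component ends + duplicate surplus
theorem pvCountA : ∀ (xs : List Int) (p : Int), (p :: xs).Pairwise (· ≤ ·) →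
    1 + pvBreaks xs p + (insert p xs.toFinset).card =
      (pvEnds (insert p xs.toFinset)).card + (p :: xs).length := by
  intro xs
  induction xs with
  | nil =>
    intro p _
    have hone : pvEnds {p} = {p} := by
      ext v; simp [pvEnds]; omega
    simp [pvBreaks, hone]
  | cons y r ih =>
    intro p hp
    rw [List.pairwise_cons] at hp
    have hpy : p ≤ y := hp.1 y (by simp)
    have hyr := (List.pairwise_cons.1 hp.2).1
    rcases lt_trichotomy y (p + 1) with hy | hy | hy
    · -- y = p (duplicate)
      have hyp : y = p := by omega
      subst hyp
      have hbr : pvBreaks (y :: r) y = 1 + pvBreaks r y := by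
        simp [pvBreaks]
      have hset : insert y (y :: r).toFinset = insert y r.toFinset := by
        simp
      have H := ih y hp.2
      rw [hbr, hset]
      simp only [List.length_cons] at H ⊢
      omega
    · -- y = p + 1 (run continues)
      have hbr : pvBreaks (y :: r) p = pvBreaks r y := by
        simp [pvBreaks, hy]
      have hpn : p ∉ (y :: r).toFinset := by
        simp only [List.mem_toFinset, List.mem_cons]
        rintro (h | h)
        · omega
        · have := hyr p h; omega
      have hends : pvEnds (insert p (y :: r).toFinset) = pvEnds ((y :: r).toFinset) := by
        apply pvNoEnd
        · simp [← hy]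
        · intro v hv
          simp only [List.mem_toFinset, List.mem_cons] at hv
          rcases hv with h | h
          · omega
          · have := hyr v h; omega
      have hcard : (insert p (y :: r).toFinset).card = ((y :: r).toFinset).card + 1 :=
        Finset.card_insert_of_notMem hpn
      have hset2 : (y :: r).toFinset = insert y r.toFinset := by simp
      rw [hbr, hcard, hends, hset2]
      have := ih y hp.2
      simp only [List.length_cons] at this ⊢
      omega
    · -- y > p + 1 (gap)
      have hbr : pvBreaks (y :: r) p = 1 + pvBreaks r y := by
        have : y ≠ p + 1 := by omega
        simp [pvBreaks, this]
      have hlb : ∀ v ∈ (y :: r).toFinset, p + 1 < v := by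
        intro v hv
        simp only [List.mem_toFinset, List.mem_cons] at hv
        rcases hv with h | h
        · omega
        · have := hyr v h; omega
      have hpn : p ∉ (y :: r).toFinset := by
        intro h; have := hlb p h; omega
      have hends : pvEnds (insert p (y :: r).toFinset) = insert p (pvEnds ((y :: r).toFinset)) :=
        pvIso p _ hlb
      have hpe : p ∉ pvEnds ((y :: r).toFinset) := by
        intro h
        exact hpn (Finset.mem_filter.1 h).1
      have hcard : (insert p (y :: r).toFinset).card = ((y :: r).toFinset).card + 1 :=
        Finset.card_insert_of_notMem hpn
      have hset2 : (y :: r).toFinset = insert y r.toFinset := by simp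
      rw [hbr, hcard, hends, Finset.card_insert_of_notMem hpe, hset2]
      have := ih y hp.2
      simp only [List.length_cons] at this ⊢
      omega

theorem pvLenMatch (w : Int) (q : Option (Int × Int) × List String) :
    (match q.1 with
      | none => q.2
      | some (s, p) => q.2 ++ [pvFmt w s p]).length = pvLenFin q := by
  rcases q with ⟨o, a⟩
  rcases o with _ | ⟨s, p⟩
  · rfl
  · simp [pvLenFin]

-- ===== VERDICT (by name: the statement is the Claim_ definition above) =====
theorem collapse_number_list_spec : Claim_unchanged_collapse_number_list := by
  unfold Claim_unchanged_collapse_number_list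
  intro lst _
  unfold Spec_collapse_number_list
  intro hnd
  unfold D_collapse_number_list at hnd
  unfold collapse_number_list collapse_number_list_alt
  set stA := lst.foldl pvStepA ([], [], 0) with hstA
  set W := ((lst.filter (fun e => (PySem.Int.ofStr? e).isSome)).map
    (fun e => PySem.Str.len e)).foldl max 0 with hWdef
  set S := (lst.filterMap pvInterval).filter (fun iv => decide (iv.1 ≤ iv.2)) with hSdef
  have hIl : stA.1 = S.flatMap pvCover := by
    rw [hstA, pvParse_tok lst ([], [], 0), pvCov_spans]
    rfl
  have hSl : stA.2.1 = lst.filter (fun e => (pvInterval e).isNone) := by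
    rw [hstA, pvParse_str lst ([], [], 0)]
    rfl
  have hW : pvWidthRel stA.2.2 W := by
    rw [hstA, pvParse_w lst ([], [], 0), hWdef, pvWidthB_fold]
    exact pvW_rel lst 0 0 ⟨le_refl 0, by omega⟩
  have hvalid : ∀ iv ∈ S, iv.1 ≤ iv.2 := by
    intro iv hiv
    have := (List.mem_filter.1 (hSdef ▸ hiv)).2
    exact of_decide_eq_true this
  set J := PySem.List.sorted S (fun iv => iv.1) with hJ
  have hperm : J.Perm S := PySem.List.sorted_perm S (fun iv => iv.1) false
  have hJle : ∀ iv ∈ J, iv.1 ≤ iv.2 := fun iv hiv => hvalid iv (hperm.mem_iff.1 hiv)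
  have hpermFlat : (J.flatMap pvCover).Perm stA.1 := by
    rw [hIl]
    exact hperm.flatMap (fun a _ => List.Perm.refl _)
  have hNdA : stA.1.Nodup := by
    rw [hstA, pvParse_tok lst ([], [], 0)]
    simpa using (not_not.1 hnd)
  have hNdJ : (J.flatMap pvCover).Nodup := hpermFlat.nodup_iff.2 hNdA
  have hcross : J.Pairwise (fun x y => ∀ u ∈ pvCover x, ∀ v ∈ pvCover y, u ≠ v) :=
    (List.pairwise_flatMap.1 hNdJ).2
  have hp1 : J.Pairwise (fun x y => x.1 ≤ y.1) :=
    PySem.List.sorted_pairwise S (fun iv => iv.1)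
  have hdisj : J.Pairwise (fun x y => x.2 < y.1) := by
    refine (hp1.and hcross).imp_of_mem ?_
    intro x y hx hy hxy
    by_contra hcon
    have hy1 : y.1 ∈ pvCover x := by
      simp only [pvCover]
      rw [PySem.List.mem_pyRange_one]
      constructor
      · exact hxy.1
      · omega
    have hy2 : y.1 ∈ pvCover y := by
      simp only [pvCover]
      rw [PySem.List.mem_pyRange_one]
      have := hJle y hy
      omega
    exact hxy.2 y.1 hy1 y.1 hy2 rfl
  have hsortA : PySem.List.sorted stA.1 (fun x => x) = J.flatMap pvCover := by
    refine PySem.List.sorted_eq_of_perm_of_pairwise_lt _ _ _ hpermFlat ?_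
    rw [List.pairwise_flatMap]
    constructor
    · intro p hp
      simp only [pvCover]
      exact PySem.List.pairwise_lt_pyRange_one p.1 (p.2 + 1)
    · refine hdisj.imp_of_mem ?_
      intro x y hx hy hxy u hu v hv
      simp only [pvCover, PySem.List.mem_pyRange_one] at hu hv
      omega
  have hfmt : pvFmt stA.2.2 = pvFmt W := pvFmt_width hW
  simp only [hsortA, hSl, pvScanA_congr hfmt, hfmt]
  set out := lst.filter (fun e => (pvInterval e).isNone) with hout
  have hA := pvScan_merge0 W J out hJle hdisj
  have hB : (match J.foldl (pvMergeB W) (none, out) with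
      | (none, acc') => acc'
      | (some (a, b), acc') => acc' ++ [pvFmt W a b]) =
      out ++ ((J.foldl pvAdd []).reverse.map (fun iv => pvFmt W iv.1 iv.2)) := by
    cases hJe : J with
    | nil => simp
    | cons iv rJ =>
      obtain ⟨a, b⟩ := iv
      rw [List.foldl_cons, List.foldl_cons]
      have h1 : pvMergeB W (none, out) (a, b) = (some (a, b), out) := by simp [pvMergeB]
      have h2 : pvAdd [] (a, b) = [(a, b)] := rfl
      rw [h1, h2]
      have := pvAdd_scan W rJ (a, b) [] out
      simpa using this
  rcases hqa : (J.flatMap pvCover).foldl (pvScanA W) (none, out) with ⟨o1, acc1⟩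
  rw [hqa] at hA
  rcases o1 with _ | ⟨s1, p1⟩ <;> exact hA.trans hB

theorem collapse_number_list_changed : Claim_changed_collapse_number_list := by
  unfold Claim_changed_collapse_number_list; decide

theorem collapse_number_list_tight : Claim_exact_collapse_number_list := by
  unfold Claim_exact_collapse_number_list
  intro lst _ hD
  unfold D_collapse_number_list at hD
  set stA := lst.foldl pvStepA ([], [], 0) with hstA
  set S := (lst.filterMap pvInterval).filter (fun iv => decide (iv.1 ≤ iv.2)) with hSdef
  set J := PySem.List.sorted S (fun iv => iv.1) with hJ
  set xs := PySem.List.sorted stA.1 (fun x => x) with hxs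
  have hIl : stA.1 = S.flatMap pvCover := by
    rw [hstA, pvParse_tok lst ([], [], 0), pvCov_spans]
    rfl
  have hSl : stA.2.1 = lst.filter (fun e => (pvInterval e).isNone) := by
    rw [hstA, pvParse_str lst ([], [], 0)]
    rfl
  have hnd : ¬ stA.1.Nodup := by
    rw [hstA, pvParse_tok lst ([], [], 0)]
    simpa using hD
  have hxsp : xs.Perm stA.1 := PySem.List.sorted_perm _ _ false
  have hxnd : ¬ xs.Nodup := fun h => hnd (hxsp.nodup_iff.1 h)
  have hxsorted : xs.Pairwise (· ≤ ·) := PySem.List.sorted_pairwise _ _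
  have hJperm : J.Perm S := PySem.List.sorted_perm _ _ false
  have hF : xs.toFinset = pvUnionF J := by
    unfold pvUnionF
    refine List.toFinset_eq_of_perm _ _ ?_
    refine hxsp.trans ?_
    rw [hIl]
    exact (hJperm.flatMap (fun a _ => List.Perm.refl _)).symm
  -- duplicate surplus
  have hcard : xs.toFinset.card < xs.length := by
    have hsub := xs.dedup_sublist
    have hlen := hsub.length_le
    rcases lt_or_eq_of_le hlen with h | h
    · rw [List.card_toFinset]; exact h
    · exact absurd (hsub.eq_of_length h ▸ xs.nodup_dedup) hxnd
  -- output lengths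
  have hlenA : (collapse_number_list lst).length = stA.2.1.length + pvEA xs := by
    unfold collapse_number_list
    rw [pvLenMatch, pvLenA0]
  have hlenB : (collapse_number_list_alt lst).length =
      (lst.filter (fun e => (pvInterval e).isNone)).length + (J.foldl pvAdd []).length := by
    unfold collapse_number_list_alt
    simp only [List.length_append, List.length_map, List.length_reverse]
    rfl
  -- J is nonempty and xs is nonempty
  cases hxe : xs with
  | nil => exact absurd (by rw [hxe]; exact List.nodup_nil) hxnd
  | cons x rest =>
  cases hJe : J with
  | nil =>
    exfalso
    have hSnil : S = [] := (List.Perm.nil_eq (hJe ▸ hJperm)).symm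
    have hxnil : xs = [] := by
      have h0 : stA.1 = [] := by rw [hIl, hSnil]; rfl
      rw [hxs, h0]
      rfl
    rw [hxnil] at hxe
    exact (List.cons_ne_nil x rest) hxe.symm
  | cons iv rJ =>
  obtain ⟨a, b⟩ := iv
  have hvalid : ∀ iv ∈ S, iv.1 ≤ iv.2 := by
    intro iv hiv
    have := (List.mem_filter.1 (hSdef ▸ hiv)).2
    exact of_decide_eq_true this
  have hJle : ∀ p ∈ J, p.1 ≤ p.2 := fun p hp => hvalid p (hJperm.mem_iff.1 hp)
  have hJp : J.Pairwise (fun x y => x.1 ≤ y.1) := PySem.List.sorted_pairwise _ _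
  rw [hJe] at hJle hJp
  rw [List.pairwise_cons] at hJp
  have hab : a ≤ b := hJle (a, b) (by simp)
  have hrJle : ∀ p ∈ rJ, p.1 ≤ p.2 := fun p hp => hJle p (by simp [hp])
  have hrJlo : ∀ v ∈ pvUnionF rJ, a ≤ v := fun v hv =>
    pvUnionF_lb (fun p hp => hJp.1 p hp) hv
  -- B's component count = number of component ends
  have hcomps : (J.foldl pvAdd []).length = pvEB J := by
    rw [hJe, List.foldl_cons]
    have : pvAdd [] (a, b) = [(a, b)] := rfl
    rw [this, pvAdd_len rJ (a, b) []]
    rfl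
  have hB : pvEB J = (pvEnds (xs.toFinset)).card := by
    rw [hJe]
    show 1 + pvMBr rJ b = _
    rw [pvCountB rJ b hrJle hJp.2, ← pvSeg a b _ hab hrJlo, ← pvUnionF_cons (a, b) rJ, ← hJe, hF]
  -- A's emission count = component ends + duplicate surplus
  have hA := pvCountA rest x (hxe ▸ hxsorted)
  have hsetx : insert x rest.toFinset = xs.toFinset := by rw [hxe]; simp
  rw [hsetx] at hA
  have hEA : pvEA xs = 1 + pvBreaks rest x := by rw [hxe]; rfl
  have hxlen : xs.length = (x :: rest).length := by rw [hxe]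
  -- conclude: A's output is strictly longer
  intro heq
  have hlen := congrArg List.length heq
  rw [hlenA, hlenB, hSl, hcomps] at hlen
  omega
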